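-- pv_equiv track=rewrite | github.com/ahmetaykk/vidpro | web_ui.py | _select_subtitle_langs
-- ===== SOURCE A (Python) =====
-- def _select_subtitle_langs(requested, info):
--     subtitles = info.get("subtitles") or {}
--     auto_caps = info.get("automatic_captions") or {}
--     available_raw = set(subtitles.keys()) | set(auto_caps.keys())
--     available = sorted({str(x).strip().lower().replace("_", "-") for x in available_raw if str(x).strip()})
--     selected = []
--     for want in requested:
--         if want in available:
--             selected.append(want)
--             continue
--         want_base = want.split("-")[0]
--         match = next((a for a in available if a.split("-")[0] == want_base), None)
--         if match:
--             selected.append(match)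
--     uniq_selected = []
--     for s in selected:
--         if s not in uniq_selected:
--             uniq_selected.append(s)
--     return uniq_selected, available
-- ===== SOURCE B (Python) =====
-- def _select_subtitle_langs(requested, info):
--     # Collect normalized codes into one set in a single sweep over both caption dicts.
--     codes = set()
--     for key in ("subtitles", "automatic_captions"):
--         d = info.get(key) or {}
--         for x in d.keys():
--             s = str(x).strip()
--             if s:
--                 codes.add(s.lower().replace("_", "-"))
--     # Per base language, the lexicographically smallest code: equals the first
--     # sorted-order match, so matching never needs the sorted list at all.
--     best = {}
--     for c in codes:
--         b = c.split("-")[0]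
--         if b not in best or c < best[b]:
--             best[b] = c
--     selected = []
--     for want in requested:
--         cand = want if want in codes else best.get(want.split("-")[0])
--         if cand is not None and cand not in selected:
--             selected.append(cand)
--     return selected, sorted(codes)
-- ===== Notes on version B (the rewrite author's own statement) =====
-- stated objective: alternative
-- what changed: B never scans the sorted list to resolve a request: it collects normalized codes in one sweep over both caption dicts, keeps per base language the lexicographically smallest code (provably the first sorted-order match), and selects with inline dedup in a single pass over requested, sorting only for the returned available list.
import Mathlib
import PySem

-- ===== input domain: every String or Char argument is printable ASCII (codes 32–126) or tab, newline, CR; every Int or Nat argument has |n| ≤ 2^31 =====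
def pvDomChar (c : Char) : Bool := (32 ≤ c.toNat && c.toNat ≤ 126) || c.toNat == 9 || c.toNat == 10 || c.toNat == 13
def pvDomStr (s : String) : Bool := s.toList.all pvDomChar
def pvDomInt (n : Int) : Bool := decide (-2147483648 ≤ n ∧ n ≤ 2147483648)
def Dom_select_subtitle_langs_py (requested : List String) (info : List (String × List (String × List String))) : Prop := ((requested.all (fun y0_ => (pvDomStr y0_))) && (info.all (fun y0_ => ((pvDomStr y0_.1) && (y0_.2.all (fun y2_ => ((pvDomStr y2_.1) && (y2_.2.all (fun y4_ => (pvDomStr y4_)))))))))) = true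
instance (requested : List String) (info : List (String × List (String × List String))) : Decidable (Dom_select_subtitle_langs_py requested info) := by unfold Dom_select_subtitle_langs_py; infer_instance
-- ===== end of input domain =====

-- B drops A's per-request first-match scan of the sorted list (and the trailing dedup pass): it
-- keeps, per base language, the lexicographically smallest code — equal to the first sorted-order
-- match — so matching never consults the sorted list (alternative algorithm; same return value).

-- ===== PORT A =====
-- shared helpers: both Pythons contain the line 'str(x).strip().lower().replace("_", "-")'
-- (in B split between the strip and the lower/replace) and both contain 's.split("-")[0]'
def pvNorm (x : String) : String :=
  PySem.Str.replace (PySem.Str.lower (PySem.Str.strip x)) "_" "-"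

-- s.split("-")[0]  (split with a nonempty separator never fails and never returns [])
def pvBase (s : String) : String :=
  ((PySem.Str.split? s "-").getD []).getD 0 ""

-- subtitles / automatic_captions / available_raw / available of Python A, line for line
def pvAvailable (info : List (String × List (String × List String))) : List String :=
  let subtitles := ((PySem.Dict.mk info).get? "subtitles").getD []
  let auto_caps := ((PySem.Dict.mk info).get? "automatic_captions").getD []
  let available_raw : PySem.Set String :=
    PySem.Set.union (PySem.Set.ofList ((PySem.Dict.mk subtitles).keys)) ((PySem.Dict.mk auto_caps).keys)
  -- the set comprehension is consumed only by sorted() (no key), so hash order is immaterial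
  PySem.List.sorted
    (PySem.Set.ofList ((available_raw.filter (fun x => PySem.Str.strip x != "")).map pvNorm))
    (fun a => a) false

def select_subtitle_langs_py (requested : List String) (info : List (String × List (String × List String))) : List String × List String :=
  let available := pvAvailable info
  let selected := requested.foldl (fun selected want =>
    if want ∈ available then selected ++ [want]
    else
      let want_base := pvBase want
      match available.find? (fun a => pvBase a == want_base) with
      | some mtch => if mtch ≠ "" then selected ++ [mtch] else selected   -- `if match:` truthiness
      | none => selected) []
  let uniq_selected := selected.foldl (fun u s => if s ∈ u then u else u ++ [s]) []
  (uniq_selected, available)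

-- ===== PORT B =====
def select_subtitle_langs_py_alt (requested : List String) (info : List (String × List (String × List String))) : List String × List String :=
  -- codes: one sweep over both caption dicts ('for key in (…): for x in d.keys(): …')
  let codes : PySem.Set String :=
    ["subtitles", "automatic_captions"].foldl (fun codes key =>
      let d := ((PySem.Dict.mk info).get? key).getD []
      ((PySem.Dict.mk d).keys).foldl (fun codes x =>
        if PySem.Str.strip x != ""
        then PySem.Set.add codes (PySem.Str.replace (PySem.Str.lower (PySem.Str.strip x)) "_" "-")
        else codes) codes) PySem.Set.empty
  -- best: per base language the lexicographically smallest code (min is order-independent,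
  -- so Python's set iteration order is immaterial here)
  let best : PySem.Dict String String :=
    codes.foldl (fun best c =>
      match best.get? (pvBase c) with
      | none => best.insert (pvBase c) c
      | some cur => if c < cur then best.insert (pvBase c) c else best) PySem.Dict.empty
  let selected := requested.foldl (fun selected want =>
    match (if PySem.Set.contains codes want then some want else best.get? (pvBase want)) with
    | some c => if c ∈ selected then selected else selected ++ [c]
    | none => selected) []
  (selected, PySem.List.sorted codes (fun a => a) false)

-- ===== PRECONDITION & SPEC =====
def Spec_select_subtitle_langs_py (requested : List String) (info : List (String × List (String × List String))) (out : List String × List String) : Prop := out = select_subtitle_langs_py_alt requested info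
instance (requested : List String) (info : List (String × List (String × List String))) (out : List String × List String) : Decidable (Spec_select_subtitle_langs_py requested info out) := by unfold Spec_select_subtitle_langs_py; infer_instance

-- ===== CLAIM (what is proved, stated in full; the proofs are below) =====
def Claim_equal_select_subtitle_langs_py : Prop := ∀ (requested : List String) (info : List (String × List (String × List String))), Dom_select_subtitle_langs_py requested info → Spec_select_subtitle_langs_py requested info (select_subtitle_langs_py requested info)

-- ===== LEMMAS AND PROOFS =====

-- B's codes set and best dict, named for the proofs (verbatim the terms in the B port)
def pvCodes (info : List (String × List (String × List String))) : PySem.Set String :=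
  ["subtitles", "automatic_captions"].foldl (fun codes key =>
    let d := ((PySem.Dict.mk info).get? key).getD []
    ((PySem.Dict.mk d).keys).foldl (fun codes x =>
      if PySem.Str.strip x != ""
      then PySem.Set.add codes (PySem.Str.replace (PySem.Str.lower (PySem.Str.strip x)) "_" "-")
      else codes) codes) PySem.Set.empty

def pvBest (info : List (String × List (String × List String))) : PySem.Dict String String :=
  (pvCodes info).foldl (fun best c =>
    match best.get? (pvBase c) with
    | none => best.insert (pvBase c) c
    | some cur => if c < cur then best.insert (pvBase c) c else best) PySem.Dict.empty

-- running minimum over a list, starting from an optional current minimum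
def pvOptMin (o : Option String) (g : List String) : Option String :=
  g.foldl (fun o c => some (match o with | none => c | some m => if c < m then c else m)) o

-- A's normalized set (the list inside pvAvailable), named for the proofs
def pvSetA (info : List (String × List (String × List String))) : List String :=
  PySem.Set.ofList
    (((PySem.Set.union
        (PySem.Set.ofList ((PySem.Dict.mk (((PySem.Dict.mk info).get? "subtitles").getD [])).keys))
        ((PySem.Dict.mk (((PySem.Dict.mk info).get? "automatic_captions").getD [])).keys)).filter
      (fun x => PySem.Str.strip x != "")).map pvNorm)

theorem pv_avail_def (info : List (String × List (String × List String))) :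
    pvAvailable info = PySem.List.sorted (pvSetA info) (fun a => a) false := rfl

-- replace.go never returns [] when something is left to emit and `new` is nonempty
theorem pv_replace_go_ne_nil (old new : List Char) (hnew : new ≠ []) :
    ∀ (fuel : Nat) (l acc : List Char), (l ≠ [] ∨ acc ≠ []) →
      PySem.Chars.replace.go old new fuel l acc ≠ [] := by
  intro fuel
  induction fuel with
  | zero => intro l acc h; simp [PySem.Chars.replace.go]; rcases h with h | h <;> simp [h]
  | succ n ih =>
    intro l acc h
    cases l with
    | nil => simp [PySem.Chars.replace.go]; tauto
    | cons c t =>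
      rw [PySem.Chars.replace.go]
      split
      · exact ih _ _ (Or.inr (by simp [hnew]))
      · exact ih _ _ (Or.inr (by simp))

theorem pv_replace_ne_nil (cs : List Char) (h : cs ≠ []) :
    PySem.Chars.replace cs ['_'] ['-'] ≠ [] := by
  rw [PySem.Chars.replace, if_neg (by simp)]
  exact pv_replace_go_ne_nil _ _ (by simp) _ _ _ (Or.inl h)

theorem pv_norm_ne_empty (x : String) (h : PySem.Str.strip x != "") : pvNorm x ≠ "" := by
  intro hc
  have h' : (PySem.Str.strip x).toList ≠ [] := by
    intro hn
    have : PySem.Str.strip x = "" := by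
      cases hs : PySem.Str.strip x; simp_all
    simp [this] at h
  have hl : PySem.Chars.lower (PySem.Str.strip x).toList ≠ [] := by
    simpa [PySem.Chars.lower] using h'
  apply pv_replace_ne_nil _ hl
  have : (pvNorm x).toList = ([] : List Char) := by rw [hc]; rfl
  simpa [pvNorm, PySem.Str.toList_replace, PySem.Str.toList_lower] using this

-- every element of `available` is nonempty
theorem pv_mem_avail_ne (info : List (String × List (String × List String))) :
    ∀ m ∈ pvAvailable info, m ≠ "" := by
  intro m hm
  unfold pvAvailable at hm
  have hm' := (PySem.List.sorted_perm _ _ _).mem_iff.mp hm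
  rw [PySem.Set.mem_ofList] at hm'
  obtain ⟨x, hx, rfl⟩ := List.mem_map.mp hm'
  exact pv_norm_ne_empty x (List.mem_filter.mp hx).2

-- membership in one inner collection sweep of B
theorem pv_inner_mem (l : List String) :
    ∀ (s : PySem.Set String) (x : String),
      (x ∈ l.foldl (fun codes x =>
        if PySem.Str.strip x != ""
        then PySem.Set.add codes (PySem.Str.replace (PySem.Str.lower (PySem.Str.strip x)) "_" "-")
        else codes) s)
      ↔ x ∈ s ∨ ∃ y ∈ l, PySem.Str.strip y != "" ∧ x = pvNorm y := by
  induction l with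
  | nil => intro s x; simp
  | cons a t ih =>
    intro s x
    simp only [List.foldl_cons]
    by_cases ha : PySem.Str.strip a != ""
    · rw [if_pos ha, ih]
      rw [PySem.Set.mem_add]
      constructor
      · rintro ((h | h) | h)
        · exact Or.inl h
        · exact Or.inr ⟨a, by simp, ha, h⟩
        · obtain ⟨y, hy, h1, h2⟩ := h
          exact Or.inr ⟨y, by simp [hy], h1, h2⟩
      · rintro (h | ⟨y, hy, h1, h2⟩)
        · exact Or.inl (Or.inl h)
        · rcases List.mem_cons.mp hy with rfl | hy'
          · exact Or.inl (Or.inr h2)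
          · exact Or.inr ⟨y, hy', h1, h2⟩
    · rw [if_neg ha, ih]
      constructor
      · rintro (h | ⟨y, hy, h1, h2⟩)
        · exact Or.inl h
        · exact Or.inr ⟨y, by simp [hy], h1, h2⟩
      · rintro (h | ⟨y, hy, h1, h2⟩)
        · exact Or.inl h
        · rcases List.mem_cons.mp hy with rfl | hy'
          · exact absurd h1 ha
          · exact Or.inr ⟨y, hy', h1, h2⟩

theorem pv_inner_nodup (l : List String) :
    ∀ (s : PySem.Set String), s.Nodup →
      (l.foldl (fun codes x =>
        if PySem.Str.strip x != ""
        then PySem.Set.add codes (PySem.Str.replace (PySem.Str.lower (PySem.Str.strip x)) "_" "-")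
        else codes) s).Nodup := by
  induction l with
  | nil => intro s hs; exact hs
  | cons a t ih =>
    intro s hs
    simp only [List.foldl_cons]
    split
    · exact ih _ (PySem.Set.nodup_add _ _ hs)
    · exact ih _ hs

theorem pv_codes_nodup (info : List (String × List (String × List String))) :
    (pvCodes info).Nodup := by
  unfold pvCodes
  simp only [List.foldl_cons, List.foldl_nil]
  exact pv_inner_nodup _ _ (pv_inner_nodup _ _ List.nodup_nil)

-- B's codes has exactly the members of A's normalized set
theorem pv_codes_mem (info : List (String × List (String × List String))) (x : String) :
    x ∈ pvCodes info ↔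
      x ∈ pvSetA info := by
  unfold pvCodes pvSetA
  simp only [List.foldl_cons, List.foldl_nil]
  rw [pv_inner_mem, pv_inner_mem, PySem.Set.mem_ofList]
  constructor
  · rintro ((h | ⟨y, hy, h1, h2⟩) | ⟨y, hy, h1, h2⟩)
    · simp at h
    · subst h2
      exact List.mem_map.mpr ⟨y, List.mem_filter.mpr ⟨(PySem.Set.mem_union _ _ _).mpr (Or.inl ((PySem.Set.mem_ofList _ _).mpr hy)), h1⟩, rfl⟩
    · subst h2
      exact List.mem_map.mpr ⟨y, List.mem_filter.mpr ⟨(PySem.Set.mem_union _ _ _).mpr (Or.inr hy), h1⟩, rfl⟩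
  · intro h
    obtain ⟨y, hy, rfl⟩ := List.mem_map.mp h
    obtain ⟨hyu, h1⟩ := List.mem_filter.mp hy
    rcases (PySem.Set.mem_union _ _ _).mp hyu with hy1 | hy2
    · exact Or.inl (Or.inr ⟨y, (PySem.Set.mem_ofList _ _).mp hy1, h1, rfl⟩)
    · exact Or.inr ⟨y, hy2, h1, rfl⟩

-- the two normalized collections are permutations of each other
theorem pv_codes_perm (info : List (String × List (String × List String))) :
    (pvCodes info).Perm
      (pvSetA info) :=
 by
  refine (List.perm_ext_iff_of_nodup (pv_codes_nodup info) ?_).mpr (pv_codes_mem info)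
  unfold pvSetA
  exact PySem.Set.nodup_ofList _

-- hence B's sorted(codes) is exactly A's `available`
theorem pv_avail_eq (info : List (String × List (String × List String))) :
    PySem.List.sorted (pvCodes info) (fun a => a) false = pvAvailable info := by
  rw [pv_avail_def]
  exact PySem.List.sorted_eq_sorted_of_perm _ _ _ (fun a b h => h) (pv_codes_perm info)

theorem pv_mem_codes_iff_avail (info : List (String × List (String × List String))) (x : String) :
    x ∈ pvCodes info ↔ x ∈ pvAvailable info := by
  rw [← pv_avail_eq, PySem.List.mem_sorted]

-- A's `available` is strictly increasing
theorem pv_avail_pairwise (info : List (String × List (String × List String))) :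
    (pvAvailable info).Pairwise (· < ·) := by
  rw [pv_avail_def]
  unfold pvSetA
  exact PySem.List.sorted_ofList_pairwise_lt _

-- find? is the head of the filtered list
theorem pv_find?_filter {α : Type} (p : α → Bool) : ∀ l : List α, l.find? p = (l.filter p).head? := by
  intro l
  induction l with
  | nil => rfl
  | cons a t ih =>
    cases h : p a with
    | true => rw [List.find?_cons_of_pos h, List.filter_cons_of_pos h, List.head?_cons]
    | false => rw [List.find?_cons_of_neg (by simp [h]), List.filter_cons_of_neg (by simp [h]), ih]

-- the best-dict fold, per key, is a running minimum over the base group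
theorem pv_fold_get (b : String) :
    ∀ (l : List String) (d : PySem.Dict String String),
      ((l.foldl (fun best c =>
        match best.get? (pvBase c) with
        | none => best.insert (pvBase c) c
        | some cur => if c < cur then best.insert (pvBase c) c else best) d).get? b)
      = pvOptMin (d.get? b) (l.filter (fun c => pvBase c == b)) := by
  intro l
  induction l with
  | nil => intro d; rfl
  | cons c t ih =>
    intro d
    simp only [List.foldl_cons, List.filter_cons]
    by_cases hb : pvBase c = b
    · subst hb
      simp only [beq_self_eq_true, if_pos]
      cases hg : d.get? (pvBase c) with
      | none =>
        refine (ih _).trans ?_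
        show pvOptMin ((d.insert (pvBase c) c).get? (pvBase c))
            (t.filter (fun c_1 => pvBase c_1 == pvBase c))
          = pvOptMin (some c) (t.filter (fun c_1 => pvBase c_1 == pvBase c))
        rw [PySem.Dict.get?_insert_self]
      | some cur =>
        refine (ih _).trans ?_
        show pvOptMin ((if c < cur then d.insert (pvBase c) c else d).get? (pvBase c))
            (t.filter (fun c_1 => pvBase c_1 == pvBase c))
          = pvOptMin (some (if c < cur then c else cur))
            (t.filter (fun c_1 => pvBase c_1 == pvBase c))
        by_cases hc : c < cur
        · simp only [if_pos hc]; rw [PySem.Dict.get?_insert_self]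
        · simp only [if_neg hc]; rw [hg]
    · have hbeq : (pvBase c == b) = false := by simp [hb]
      rw [hbeq]
      simp only [Bool.false_eq_true, if_false]
      cases hg : d.get? (pvBase c) with
      | none =>
        refine (ih _).trans ?_
        show pvOptMin ((d.insert (pvBase c) c).get? b) (t.filter (fun c => pvBase c == b))
          = pvOptMin (d.get? b) (t.filter (fun c => pvBase c == b))
        rw [PySem.Dict.get?_insert, if_neg (Ne.symm hb)]
      | some cur =>
        refine (ih _).trans ?_
        show pvOptMin ((if c < cur then d.insert (pvBase c) c else d).get? b)
            (t.filter (fun c => pvBase c == b))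
          = pvOptMin (d.get? b) (t.filter (fun c => pvBase c == b))
        by_cases hc : c < cur
        · simp only [if_pos hc]; rw [PySem.Dict.get?_insert, if_neg (Ne.symm hb)]
        · simp only [if_neg hc]

-- the running minimum picks a least member
theorem pv_optmin_some : ∀ (g : List String) (a : String),
    ∃ m, pvOptMin (some a) g = some m ∧ (m = a ∨ m ∈ g) ∧ m ≤ a ∧ ∀ y ∈ g, m ≤ y := by
  intro g
  induction g with
  | nil =>
    intro a
    exact ⟨a, rfl, Or.inl rfl, le_refl a, by simp⟩
  | cons c t ih =>
    intro a
    obtain ⟨m, h1, h2, h3, h4⟩ := ih (if c < a then c else a)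
    have ha' : (if c < a then c else a) ≤ a := by
      by_cases hca : c < a
      · rw [if_pos hca]; exact le_of_lt hca
      · rw [if_neg hca]
    have hc' : (if c < a then c else a) ≤ c := by
      by_cases hca : c < a
      · rw [if_pos hca]
      · rw [if_neg hca]; exact not_lt.mp hca
    refine ⟨m, h1, ?_, le_trans h3 ha', ?_⟩
    · rcases h2 with h2 | h2
      · by_cases hca : c < a
        · rw [if_pos hca] at h2; exact Or.inr (by rw [h2]; exact List.mem_cons_self ..)
        · rw [if_neg hca] at h2; exact Or.inl h2
      · exact Or.inr (List.mem_cons_of_mem _ h2)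
    · intro y hy
      rcases List.mem_cons.mp hy with hy1 | hy2
      · subst hy1; exact le_trans h3 hc'
      · exact h4 y hy2

-- the running minimum over any permutation of a strictly increasing list is its head
theorem pv_optmin_head (g g' : List String) (hp : g'.Perm g) (hs : g.Pairwise (· < ·)) :
    pvOptMin none g' = g.head? := by
  cases g with
  | nil =>
    have : g' = [] := List.Perm.eq_nil hp
    subst this; rfl
  | cons h t =>
    cases g' with
    | nil => exact absurd hp.length_eq (by simp)
    | cons c u =>
      have hstep : pvOptMin none (c :: u) = pvOptMin (some c) u := by
        simp only [pvOptMin, List.foldl_cons]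
      obtain ⟨m, h1, h2, h3, h4⟩ := pv_optmin_some u c
      have hmem : m ∈ c :: u := by
        rcases h2 with rfl | hm
        · simp
        · simp [hm]
      have hle : ∀ y ∈ c :: u, m ≤ y := by
        intro y hy
        rcases List.mem_cons.mp hy with rfl | hy'
        · exact h3
        · exact h4 y hy'
      have hmg : m ∈ h :: t := hp.mem_iff.mp hmem
      have hhg' : h ∈ c :: u := hp.mem_iff.mpr (by simp)
      have hmh : m ≤ h := hle h hhg'
      have : m = h := by
        rcases List.mem_cons.mp hmg with rfl | hmt
        · rfl
        · exact absurd (lt_of_lt_of_le ((List.pairwise_cons.mp hs).1 m hmt) hmh) (lt_irrefl h)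
      rw [hstep, h1, this]
      rfl

-- B's base index agrees with A's first-sorted-match scan
theorem pv_best_eq (info : List (String × List (String × List String))) (b : String) :
    (pvBest info).get? b = (pvAvailable info).find? (fun a => pvBase a == b) := by
  unfold pvBest
  rw [pv_fold_get, pv_find?_filter]
  have hperm : ((pvCodes info).filter (fun c => pvBase c == b)).Perm
      ((pvAvailable info).filter (fun c => pvBase c == b)) := by
    refine List.Perm.filter _ ?_
    rw [pv_avail_def]
    exact (pv_codes_perm info).trans (PySem.List.sorted_perm _ _ _).symm
  have hpair : ((pvAvailable info).filter (fun c => pvBase c == b)).Pairwise (· < ·) :=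
    List.Pairwise.filter _ (pv_avail_pairwise info)
  have := pv_optmin_head _ _ hperm hpair
  simpa using this

-- A's candidate for one requested code, as an Option
def pvCandA (av : List String) (want : String) : Option String :=
  if want ∈ av then some want
  else
    match av.find? (fun a => pvBase a == pvBase want) with
    | some mtch => if mtch ≠ "" then some mtch else none
    | none => none

-- a loop that appends/skips per Option candidate is a fold over the filterMap
theorem pv_foldl_filterMap {α β : Type} (f : α → Option β) (g : List β → β → List β) :
    ∀ (l : List α) (acc : List β),
      l.foldl (fun acc x => (f x).elim acc (fun c => g acc c)) acc
      = (l.filterMap f).foldl g acc := by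
  intro l
  induction l with
  | nil => intro acc; rfl
  | cons x t ih =>
    intro acc
    simp only [List.foldl_cons, List.filterMap_cons]
    cases f x <;> simp [ih]

-- B's candidate equals A's candidate
theorem pv_cand_eq (info : List (String × List (String × List String))) (want : String) :
    (if PySem.Set.contains (pvCodes info) want then some want
     else (pvBest info).get? (pvBase want))
    = pvCandA (pvAvailable info) want := by
  have hmem : PySem.Set.contains (pvCodes info) want = decide (want ∈ pvAvailable info) := by
    simp [PySem.Set.contains, pv_mem_codes_iff_avail]
  rw [hmem, pv_best_eq]
  unfold pvCandA
  by_cases h : want ∈ pvAvailable info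
  · simp [h]
  · simp only [h, decide_false, Bool.false_eq_true, if_false]
    cases hf : (pvAvailable info).find? (fun a => pvBase a == pvBase want) with
    | none => simp
    | some m =>
      have hm : m ∈ pvAvailable info := List.mem_of_find?_eq_some hf
      simp [pv_mem_avail_ne info m hm]

theorem pv_main (requested : List String) (info : List (String × List (String × List String))) :
    select_subtitle_langs_py requested info = select_subtitle_langs_py_alt requested info := by
  unfold select_subtitle_langs_py select_subtitle_langs_py_alt
  simp only []
  have hcodes : (["subtitles", "automatic_captions"].foldl (fun codes key =>
      let d := ((PySem.Dict.mk info).get? key).getD []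
      ((PySem.Dict.mk d).keys).foldl (fun codes x =>
        if PySem.Str.strip x != ""
        then PySem.Set.add codes (PySem.Str.replace (PySem.Str.lower (PySem.Str.strip x)) "_" "-")
        else codes) codes) PySem.Set.empty) = pvCodes info := rfl
  rw [hcodes]
  refine Prod.ext ?_ ((pv_avail_eq info).symm)
  show (requested.foldl (fun selected want =>
      if want ∈ pvAvailable info then selected ++ [want]
      else
        match (pvAvailable info).find? (fun a => pvBase a == pvBase want) with
        | some mtch => if mtch ≠ "" then selected ++ [mtch] else selected
        | none => selected) []).foldl (fun u s => if s ∈ u then u else u ++ [s]) []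
    = requested.foldl (fun selected want =>
      match (if PySem.Set.contains (pvCodes info) want then some want
             else (pvBest info).get? (pvBase want)) with
      | some c => if c ∈ selected then selected else selected ++ [c]
      | none => selected) []
  have hfunA : (fun (selected : List String) want =>
      if want ∈ pvAvailable info then selected ++ [want]
      else match (pvAvailable info).find? (fun a => pvBase a == pvBase want) with
        | some mtch => if mtch ≠ "" then selected ++ [mtch] else selected
        | none => selected)
      = (fun (selected : List String) want =>
        (pvCandA (pvAvailable info) want).elim selected (fun c => selected ++ [c])) := by
    funext acc want
    unfold pvCandA
    by_cases h : want ∈ pvAvailable info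
    · simp [h]
    · simp only [h, if_false]
      cases hf : (pvAvailable info).find? (fun a => pvBase a == pvBase want) with
      | none => simp
      | some m => by_cases hm : m = "" <;> simp [hm]
  rw [hfunA, pv_foldl_filterMap (pvCandA (pvAvailable info)) (fun acc c => acc ++ [c]) requested [],
    PySem.List.foldl_append_singleton_eq_self, List.nil_append]
  have hfunB : (fun (selected : List String) want =>
      match (if PySem.Set.contains (pvCodes info) want then some want
             else (pvBest info).get? (pvBase want)) with
      | some c => if c ∈ selected then selected else selected ++ [c]
      | none => selected)
      = (fun (selected : List String) want =>
        (pvCandA (pvAvailable info) want).elim selected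
          (fun c => if c ∈ selected then selected else selected ++ [c])) := by
    funext acc want
    rw [pv_cand_eq info want]
    cases pvCandA (pvAvailable info) want <;> rfl
  rw [hfunB, pv_foldl_filterMap (pvCandA (pvAvailable info)) (fun u s => if s ∈ u then u else u ++ [s]) requested []]

-- ===== VERDICT (by name: the statement is the Claim_ definition above) =====
theorem select_subtitle_langs_py_spec : Claim_equal_select_subtitle_langs_py := by
  intro requested info _
  exact pv_main requested info
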